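-- pv_equiv track=rewrite | github.com/chikchengyao/aoc2018 | 02/a02.py | has
-- ===== SOURCE A (Python) =====
-- def has(s, n):
--     dc = {}
--     for char in s:
--         if char not in dc:
--             dc[char] = 1
--         else:
--             dc[char] += 1
--
--     return n in dc.values()
-- ===== SOURCE B (Python) =====
-- def has(s, n):
--     t = sorted(s)
--     while t:
--         c = t[0]
--         k = 1
--         while k < len(t) and t[k] == c:
--             k += 1
--         if k == n:
--             return True
--         t = t[k:]
--     return False
-- ===== Notes on version B (the rewrite author's own statement) =====
-- stated objective: alternative
-- what changed: Replaces the frequency-dict tally with a sort-then-scan algorithm: sort the characters, walk the sorted list run by run (equal characters are adjacent) and return True iff some run length equals n.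
import Mathlib
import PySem

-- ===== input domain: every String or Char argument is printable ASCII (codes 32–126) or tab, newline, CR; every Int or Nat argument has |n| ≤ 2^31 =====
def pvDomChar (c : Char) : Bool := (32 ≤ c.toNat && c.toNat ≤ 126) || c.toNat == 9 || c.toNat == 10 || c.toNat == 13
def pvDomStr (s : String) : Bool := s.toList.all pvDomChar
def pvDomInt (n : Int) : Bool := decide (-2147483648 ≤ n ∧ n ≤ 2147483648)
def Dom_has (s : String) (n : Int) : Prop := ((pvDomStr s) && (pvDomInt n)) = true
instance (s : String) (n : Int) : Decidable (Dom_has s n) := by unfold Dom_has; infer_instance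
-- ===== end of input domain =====

-- B replaces A's frequency dict by sort-then-run-scan: sort the characters, then check run lengths (alternative algorithm, not faster).

-- ===== PORT A =====
def has (s : String) (n : Int) : Bool :=
  let dc := s.toList.foldl
    (fun dc char =>
      if dc.contains char = false then dc.insert char 1
      else dc.insert char (dc.getD char 0 + 1))  -- dc[char] += 1; getD safe: contains holds here
    (PySem.Dict.empty : PySem.Dict Char Int)
  dc.values.contains n

-- ===== PORT B =====
-- the while loop of Source B: t[0] = c, k = 1 + length of the run of c's after it; return True if k == n, else continue on t[k:]
def runScan (n : Int) : List Char → Bool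
  | [] => false
  | c :: rest =>
    let k : Int := 1 + (rest.takeWhile (· == c)).length
    if k = n then true
    else runScan n (rest.dropWhile (· == c))
termination_by l => l.length
decreasing_by
  simp only [List.length_cons]
  exact Nat.lt_succ_of_le (List.length_dropWhile_le _ _)

def has_alt (s : String) (n : Int) : Bool :=
  runScan n (PySem.List.sorted s.toList (fun c => c) false)

-- ===== PRECONDITION & SPEC =====
def Spec_has (s : String) (n : Int) (out : Bool) : Prop := out = has_alt s n
instance (s : String) (n : Int) (out : Bool) : Decidable (Spec_has s n out) := by unfold Spec_has; infer_instance

-- ===== CLAIM (what is proved, stated in full; the proofs are below) =====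
def Claim_equal_has : Prop := ∀ (s : String) (n : Int), Dom_has s n → Spec_has s n (has s n)

-- ===== LEMMAS AND PROOFS =====

-- A's if/else update step is exactly the Counter step.
lemma has_step_eq_counter_step :
    (fun (dc : PySem.Dict Char Int) char =>
      if dc.contains char = false then dc.insert char 1
      else dc.insert char (dc.getD char 0 + 1))
      = (fun (dc : PySem.Dict Char Int) char => dc.modify char 0 (· + 1)) := by
  funext d c
  by_cases h : d.contains c = true
  · simp [h, PySem.Dict.modify]
  · simp at h
    simp [h, PySem.Dict.modify, PySem.Dict.getD_of_not_contains (h := h)]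

-- A returns true iff some character of s occurs exactly n times.
lemma hasA_iff (s : String) (n : Int) :
    has s n = true ↔ ∃ c ∈ s.toList, (s.toList.count c : Int) = n := by
  unfold has
  simp only [has_step_eq_counter_step, ← PySem.Dict.counter_eq_foldl]
  simp only [PySem.Dict.values, PySem.Dict.items_counter, List.map_map, List.contains]
  rw [List.elem_eq_mem]
  simp only [decide_eq_true_iff, List.mem_map, Function.comp, PySem.Set.mem_ofList]

-- In a sorted list, once the leading run of c's is dropped, c is gone.
lemma not_mem_dropWhile_of_sorted (c : Char) (rest : List Char)
    (hp : rest.Pairwise (· ≤ ·)) (hc : ∀ x ∈ rest, c ≤ x) :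
    c ∉ rest.dropWhile (· == c) := by
  induction rest with
  | nil => simp
  | cons a rs ih =>
    by_cases ha : (a == c) = true
    · rw [List.dropWhile_cons, if_pos ha]
      exact ih hp.tail (fun x hx => hc x (List.mem_cons_of_mem _ hx))
    · rw [List.dropWhile_cons, if_neg ha]
      intro hmem
      rcases List.mem_cons.mp hmem with h | h
      · exact ha (by simp [h.symm])
      · have h1 : a ≤ c := (List.pairwise_cons.mp hp).1 c h
        have h2 : c ≤ a := hc a (List.mem_cons_self)
        exact ha (by simp [le_antisymm h1 h2])

-- On a sorted list, runScan is exactly "some character occurs exactly n times".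
lemma runScan_iff (n : Int) (l : List Char) (hl : l.Pairwise (· ≤ ·)) :
    runScan n l = true ↔ ∃ c ∈ l, (l.count c : Int) = n := by
  suffices h : ∀ (m : Nat) (l : List Char), l.length ≤ m → l.Pairwise (· ≤ ·) →
      (runScan n l = true ↔ ∃ c ∈ l, (l.count c : Int) = n) from
    h l.length l le_rfl hl
  intro m
  induction m with
  | zero =>
    intro l hlen _
    have : l = [] := List.eq_nil_of_length_eq_zero (Nat.le_zero.mp hlen)
    subst this; simp [runScan]
  | succ m ih =>
  intro l hlen hl
  match l, hlen, hl with
  | [], _, _ => simp [runScan]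
  | c :: rest, hlen, hl =>
    have hrest := hl.tail
    have hcle : ∀ x ∈ rest, c ≤ x := (List.pairwise_cons.mp hl).1
    set t := rest.takeWhile (· == c) with ht
    set d := rest.dropWhile (· == c) with hd
    have hsplit : rest = t ++ d := (List.takeWhile_append_dropWhile).symm
    have htc : ∀ x ∈ t, x = c := by
      intro x hx
      have := List.mem_takeWhile_imp hx
      simpa using this.symm
    have hcd : c ∉ d := not_mem_dropWhile_of_sorted c rest hrest hcle
    have hdp : d.Pairwise (· ≤ ·) := by
      rw [hsplit] at hrest; exact (List.pairwise_append.mp hrest).2.1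
    have hlend : d.length ≤ rest.length := List.length_dropWhile_le _ _
    have hcount_c : ((c :: rest).count c : Int) = 1 + t.length := by
      rw [hsplit]
      have h1 : t.count c = t.length := by
        rw [List.count_eq_length]; intro x hx; rw [htc x hx]
      have h2 : d.count c = 0 := List.count_eq_zero.mpr hcd
      simp [List.count_append, h1, h2]
      omega
    have hcount_ne : ∀ x, x ≠ c → (c :: rest).count x = d.count x := by
      intro x hx
      rw [hsplit]
      have h1 : t.count x = 0 := by
        rw [List.count_eq_zero]; intro hmem; exact hx (htc x hmem)
      simp [List.count_cons, List.count_append, h1]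
      exact fun h => hx h.symm
    rw [runScan]
    by_cases hk : (1 + (t.length : Int)) = n
    · rw [← ht, if_pos hk]
      constructor
      · intro _
        exact ⟨c, List.mem_cons_self, by rw [hcount_c]; exact hk⟩
      · intro _; rfl
    · rw [← ht, if_neg hk, ← hd]
      rw [ih d (by have := hlend; simp at hlen; omega) hdp]
      constructor
      · rintro ⟨x, hxd, hxc⟩
        have hxne : x ≠ c := fun h => hcd (h ▸ hxd)
        refine ⟨x, ?_, ?_⟩
        · exact List.mem_cons_of_mem _ (hsplit ▸ List.mem_append_right t hxd)
        · rw [hcount_ne x hxne]; exact hxc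
      · rintro ⟨x, hxl, hxc⟩
        by_cases hxceq : x = c
        · exfalso; apply hk
          rw [← hxc, hxceq, hcount_c]
        · have hxrest : x ∈ rest := by
            rcases List.mem_cons.mp hxl with h | h
            · exact absurd h hxceq
            · exact h
          have hxd : x ∈ d := by
            rw [hsplit] at hxrest
            rcases List.mem_append.mp hxrest with h | h
            · exact absurd (htc x h) hxceq
            · exact h
          exact ⟨x, hxd, by rw [← hcount_ne x hxceq]; exact hxc⟩

-- ===== VERDICT (by name: the statement is the Claim_ definition above) =====
theorem has_spec : Claim_equal_has := by
  intro s n _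
  unfold Spec_has has_alt
  have hp : (PySem.List.sorted s.toList (fun c => c) false).Pairwise (· ≤ ·) := by
    have := PySem.List.sorted_pairwise (xs := s.toList) (key := fun c => c)
    simpa using this
  have hperm : (PySem.List.sorted s.toList (fun c => c) false).Perm s.toList :=
    PySem.List.sorted_perm _ _ _
  rw [Bool.eq_iff_iff, hasA_iff, runScan_iff n _ hp]
  constructor
  · rintro ⟨c, hc, h⟩
    exact ⟨c, hperm.mem_iff.mpr hc, by rw [hperm.count_eq]; exact h⟩
  · rintro ⟨c, hc, h⟩
    exact ⟨c, hperm.mem_iff.mp hc, by rw [← hperm.count_eq]; exact h⟩
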